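-- pv_equiv track=rewrite | github.com/Juno-T/succint-bp | bp.py | getPioneerFamily
-- ===== SOURCE A (Python) =====
-- from typing import List, Union
--
-- OPEN=True
--
-- def getPioneerFamily(P: List[bool], block_size: int):
--   def b(i):
--     return i//block_size
--   R=[False for _ in P]
--   P_prime = []
--   stk = []
--   length = len(P)
--   potential_pioneer = None
--   for i,p in enumerate(P):
--     if p==OPEN:
--       open_i = i
--       stk.append(open_i)
--     else:
--       close_i=i
--       open_i=stk.pop()
--       if open_i==0 or close_i==length-1:
--         R[open_i]=True
--         R[close_i]=True
--       if potential_pioneer is not None: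
--         pp_open_i, pp_close_i = potential_pioneer
--         if (b(open_i)!=b(pp_open_i) or b(close_i)!=b(pp_close_i)):
--           R[pp_open_i]=True
--           R[pp_close_i]=True
--       if b(open_i)==b(close_i):
--         potential_pioneer=None
--       else:
--         potential_pioneer=(open_i, close_i)
--   P_prime = [P[i] for i in range(len(P)) if R[i]]
--   assert(len(P_prime)==sum(R))
--   assert(len(stk)==0)
--
--   return R, P_prime
-- ===== SOURCE B (Python) =====
-- def getPioneerFamily(P, block_size):
--     n = len(P)
--     # Match each closing parenthesis to its opener via a depth-indexed table (no stack):
--     # at nesting depth d, opens and their matching closes alternate, so the close that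
--     # brings the depth back to d matches the most recent open recorded at depth d.
--     last_open = {}
--     depth = 0
--     pairs = []  # ascending closing index = the order A pops matched pairs
--     for i, p in enumerate(P):
--         if p:
--             last_open[depth] = i
--             depth += 1
--         else:
--             depth -= 1
--             assert depth >= 0
--             pairs.append((last_open[depth], i))
--     assert depth == 0
--     b = lambda j: j // block_size
--     # Closed-form marking: a pair is marked if it touches either end of P, and a
--     # block-spanning pair is marked iff the next pair (in closing order) sits in a
--     # different open-block or close-block.
--     marked = set()
--     for o, c in pairs:
--         if o == 0 or c == n - 1:
--             marked.add(o)
--             marked.add(c)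
--     for (o, c), (o2, c2) in zip(pairs, pairs[1:]):
--         if b(o) != b(c) and (b(o2) != b(o) or b(c2) != b(c)):
--             marked.add(o)
--             marked.add(c)
--     R = [i in marked for i in range(n)]
--     P_prime = [P[i] for i in range(n) if R[i]]
--     return R, P_prime
-- ===== Notes on version B (the rewrite author's own statement) =====
-- stated objective: alternative
-- what changed: B removes both of A's stateful mechanisms: closes are matched to opens via a depth-indexed table (last open seen at each nesting depth) instead of a stack, and the potential_pioneer machine is replaced by a closed-form rule over consecutive matched pairs (a block-spanning pair is marked iff the next pair in closing order lies in a different open- or close-block), collected into a set of marked indices.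
import Mathlib
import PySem

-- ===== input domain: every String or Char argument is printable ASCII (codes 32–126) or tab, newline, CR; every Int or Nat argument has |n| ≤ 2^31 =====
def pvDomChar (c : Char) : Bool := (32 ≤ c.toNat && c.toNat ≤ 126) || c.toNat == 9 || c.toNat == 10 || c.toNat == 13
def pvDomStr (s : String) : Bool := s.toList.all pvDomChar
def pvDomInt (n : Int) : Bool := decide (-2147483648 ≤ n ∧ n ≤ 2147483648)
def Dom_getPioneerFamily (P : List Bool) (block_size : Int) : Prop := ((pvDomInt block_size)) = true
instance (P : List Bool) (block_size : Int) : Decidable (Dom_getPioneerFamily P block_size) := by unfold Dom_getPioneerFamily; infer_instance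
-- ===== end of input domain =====

-- B replaces A's stack and potential_pioneer state machine by a depth-indexed match table and a
-- closed-form marking over consecutive matched pairs (objective: alternative, same O(n) cost).

-- ===== PORT A =====
-- the final comprehension 'P_prime = [P[i] for i in range(len(P)) if R[i]]' (identical line in A and B)
def pvPPrime (P R : List Bool) : List Bool :=
  ((PySem.List.pyRange 0 (P.length : Int) 1).filter (fun i => PySem.List.pyGetD R i false)).map
    (fun i => PySem.List.pyGetD P i false)

-- one iteration of A's loop; state = Option (R, stk, potential_pioneer), none = IndexError from stk.pop()
def pvStepA (bs length : Int) (s : Option (List Bool × List Int × Option (Int × Int))) (ip : Int × Bool) :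
    Option (List Bool × List Int × Option (Int × Int)) :=
  match s with
  | none => none
  | some (R, stk, pp) =>
    if ip.2 = true then some (R, stk ++ [ip.1], pp)
    else
      match PySem.List.pop? stk with
      | none => none
      | some (open_i, stk') =>
        let close_i := ip.1
        let R1 := if open_i = 0 ∨ close_i = length - 1 then
            PySem.List.pySetD (PySem.List.pySetD R open_i true) close_i true else R
        let R2 := match pp with
          | none => R1
          | some (ppo, ppc) =>
            if PySem.Int.floordiv open_i bs ≠ PySem.Int.floordiv ppo bs ∨
               PySem.Int.floordiv close_i bs ≠ PySem.Int.floordiv ppc bs then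
              PySem.List.pySetD (PySem.List.pySetD R1 ppo true) ppc true
            else R1
        let pp' := if PySem.Int.floordiv open_i bs = PySem.Int.floordiv close_i bs then
            (none : Option (Int × Int)) else some (open_i, close_i)
        some (R2, stk', pp')

def getPioneerFamily (P : List Bool) (block_size : Int) : List Bool × List Bool :=
  let length : Int := (P.length : Int)
  match (PySem.List.enumerate P).foldl (pvStepA block_size length)
      (some (P.map (fun _ => false), ([] : List Int), (none : Option (Int × Int)))) with
  | none => ([], [])        -- stk.pop() raised IndexError: outside Pre_
  | some (R, stk, _) =>
    if stk.isEmpty then (R, pvPPrime P R)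
    else ([], [])           -- assert(len(stk)==0) fails: outside Pre_

-- ===== PORT B =====
-- matching pass: depth-indexed table last_open instead of a stack; none = a failed assert (depth < 0)
-- or a KeyError on last_open[depth] (both only on unbalanced input, outside Pre_)
def pvCollectB (s : Option (PySem.Dict Int Int × Int × List (Int × Int))) (ip : Int × Bool) :
    Option (PySem.Dict Int Int × Int × List (Int × Int)) :=
  match s with
  | none => none
  | some (lo, depth, ps) =>
    if ip.2 = true then some (lo.insert depth ip.1, depth + 1, ps)
    else
      let d' := depth - 1
      if d' < 0 then none
      else
        match lo.get? d' with
        | none => none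
        | some o => some (lo, d', ps ++ [(o, ip.1)])

-- 'if o == 0 or c == n - 1: marked.add(o); marked.add(c)'
def pvEdgeMark (n : Int) (m : PySem.Set Int) (pr : Int × Int) : PySem.Set Int :=
  if pr.1 = 0 ∨ pr.2 = n - 1 then (m.add pr.1).add pr.2 else m

-- 'if b(o) != b(c) and (b(o2) != b(o) or b(c2) != b(c)): marked.add(o); marked.add(c)'
def pvZipMark (bs : Int) (m : PySem.Set Int) (q : (Int × Int) × (Int × Int)) : PySem.Set Int :=
  if PySem.Int.floordiv q.1.1 bs ≠ PySem.Int.floordiv q.1.2 bs ∧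
     (PySem.Int.floordiv q.2.1 bs ≠ PySem.Int.floordiv q.1.1 bs ∨
      PySem.Int.floordiv q.2.2 bs ≠ PySem.Int.floordiv q.1.2 bs) then
    (m.add q.1.1).add q.1.2
  else m

def getPioneerFamily_alt (P : List Bool) (block_size : Int) : List Bool × List Bool :=
  let n : Int := (P.length : Int)
  match (PySem.List.enumerate P).foldl pvCollectB
      (some (PySem.Dict.empty, (0 : Int), ([] : List (Int × Int)))) with
  | none => ([], [])        -- an assert failed / KeyError: outside Pre_
  | some (_, depth, pairs) =>
    if depth = 0 then
      let marked := (pairs.zip pairs.tail).foldl (pvZipMark block_size)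
          (pairs.foldl (pvEdgeMark n) PySem.Set.empty)
      let R := (PySem.List.pyRange 0 n 1).map (fun i => marked.contains i)
      (R, pvPPrime P R)
    else ([], [])           -- assert depth == 0 fails: outside Pre_

-- ===== PRECONDITION & SPEC =====
-- Pre_ excludes exactly the inputs where the Python A raises: unbalanced P (IndexError on stk.pop()
-- or the final AssertionError) and block_size = 0 with a nonempty balanced P (ZeroDivisionError in b()).
def Pre_getPioneerFamily (P : List Bool) (block_size : Int) : Prop :=
  (∀ n ∈ List.range (P.length + 1), (P.take n).count false ≤ (P.take n).count true) ∧
  P.count true = P.count false ∧ (P ≠ [] → block_size ≠ 0)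
instance (P : List Bool) (block_size : Int) : Decidable (Pre_getPioneerFamily P block_size) := by
  unfold Pre_getPioneerFamily; infer_instance

def pvWitness_getPioneerFamily : List Bool × Int := ([true, true, false, false, true, false], 2)

def Spec_getPioneerFamily (P : List Bool) (block_size : Int) (out : List Bool × List Bool) : Prop := out = getPioneerFamily_alt P block_size
instance (P : List Bool) (block_size : Int) (out : List Bool × List Bool) : Decidable (Spec_getPioneerFamily P block_size out) := by unfold Spec_getPioneerFamily; infer_instance

-- ===== CLAIM (what is proved, stated in full; the proofs are below) =====
def Claim_equal_getPioneerFamily : Prop := ∀ (P : List Bool) (block_size : Int), Dom_getPioneerFamily P block_size → Pre_getPioneerFamily P block_size → Spec_getPioneerFamily P block_size (getPioneerFamily P block_size)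

-- ===== LEMMAS AND PROOFS =====

-- ---- proof-side reformulation of A: collect pairs with a stack, then mark with the pp machine ----
def pvCollect (s : Option (List Int × List (Int × Int))) (ip : Int × Bool) :
    Option (List Int × List (Int × Int)) :=
  match s with
  | none => none
  | some (stk, pairs) =>
    if ip.2 = true then some (stk ++ [ip.1], pairs)
    else
      match PySem.List.pop? stk with
      | none => none
      | some (o, stk') => some (stk', pairs ++ [(o, ip.1)])

def pvMark (bs length : Int) (s : List Bool × Option (Int × Int)) (pr : Int × Int) :
    List Bool × Option (Int × Int) :=
  let open_i := pr.1
  let close_i := pr.2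
  let R1 := if open_i = 0 ∨ close_i = length - 1 then
      PySem.List.pySetD (PySem.List.pySetD s.1 open_i true) close_i true else s.1
  let R2 := match s.2 with
    | none => R1
    | some (ppo, ppc) =>
      if PySem.Int.floordiv open_i bs ≠ PySem.Int.floordiv ppo bs ∨
         PySem.Int.floordiv close_i bs ≠ PySem.Int.floordiv ppc bs then
        PySem.List.pySetD (PySem.List.pySetD R1 ppo true) ppc true
      else R1
  let pp' := if PySem.Int.floordiv open_i bs = PySem.Int.floordiv close_i bs then
      (none : Option (Int × Int)) else some (open_i, close_i)
  (R2, pp')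

theorem pvStepA_none (bs len : Int) (l : List (Int × Bool)) :
    l.foldl (pvStepA bs len) none = none := by
  induction l with
  | nil => rfl
  | cons x t ih => simpa [pvStepA] using ih

theorem pvCollect_none (l : List (Int × Bool)) :
    l.foldl pvCollect none = none := by
  induction l with
  | nil => rfl
  | cons x t ih => simpa [pvCollect] using ih

theorem pvCollectB_none (l : List (Int × Bool)) :
    l.foldl pvCollectB none = none := by
  induction l with
  | nil => rfl
  | cons x t ih => simpa [pvCollectB] using ih

theorem pvCollect_close (stk : List Int) (ps : List (Int × Int)) (i : Int)
    (r : Int × List Int) (h : PySem.List.pop? stk = some r) :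
    pvCollect (some (stk, ps)) (i, false) = some (r.2, ps ++ [(r.1, i)]) := by
  simp [pvCollect, h]

theorem pvStepA_close (bs len : Int) (R : List Bool) (stk : List Int)
    (pp : Option (Int × Int)) (i : Int) (r : Int × List Int)
    (h : PySem.List.pop? stk = some r) :
    pvStepA bs len (some (R, stk, pp)) (i, false) =
      some ((pvMark bs len (R, pp) (r.1, i)).1, r.2, (pvMark bs len (R, pp) (r.1, i)).2) := by
  cases pp <;> simp [pvStepA, pvMark, h]

theorem pvCollect_acc (l : List (Int × Bool)) (stk : List Int) (ps : List (Int × Int)) :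
    l.foldl pvCollect (some (stk, ps)) =
      (l.foldl pvCollect (some (stk, []))).map (fun r => (r.1, ps ++ r.2)) := by
  induction l generalizing stk ps with
  | nil => simp
  | cons x t ih =>
    obtain ⟨i, p⟩ := x
    cases p with
    | true =>
      simp only [List.foldl_cons, pvCollect]
      exact ih (stk ++ [i]) ps
    | false =>
      cases h : PySem.List.pop? stk with
      | none =>
        simp only [List.foldl_cons, pvCollect, h]
        simp [pvCollect_none]
      | some r =>
        rw [List.foldl_cons, List.foldl_cons, pvCollect_close stk ps i r h,
            pvCollect_close stk [] i r h, List.nil_append,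
            ih r.2 (ps ++ [(r.1, i)]), ih r.2 [(r.1, i)]]
        cases t.foldl pvCollect (some (r.2, [])) <;> simp

-- fusion: A's interleaved loop = collect-then-mark
theorem pv_fusion (bs len : Int) (l : List (Int × Bool)) (R : List Bool)
    (stk : List Int) (pp : Option (Int × Int)) :
    l.foldl (pvStepA bs len) (some (R, stk, pp)) =
      (l.foldl pvCollect (some (stk, []))).map
        (fun r => ((r.2.foldl (pvMark bs len) (R, pp)).1, r.1,
                   (r.2.foldl (pvMark bs len) (R, pp)).2)) := by
  induction l generalizing R stk pp with
  | nil => simp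
  | cons x t ih =>
    obtain ⟨i, p⟩ := x
    cases p with
    | true =>
      simp only [List.foldl_cons, pvStepA, pvCollect]
      exact ih R (stk ++ [i]) pp
    | false =>
      cases h : PySem.List.pop? stk with
      | none =>
        simp only [List.foldl_cons, pvStepA, pvCollect, h]
        simp [pvStepA_none, pvCollect_none]
      | some r =>
        rw [List.foldl_cons, List.foldl_cons, pvStepA_close bs len R stk pp i r h,
            pvCollect_close stk [] i r h, List.nil_append, ih,
            pvCollect_acc t r.2 [(r.1, i)]]
        cases t.foldl pvCollect (some (r.2, [])) <;> simp

-- ---- stack-collect agrees with B's depth-table collect ----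
def pvInB (n x : Int) : Prop := 0 ≤ x ∧ x < n

def pvSD (n : Int) : Option (List Int × List (Int × Int)) →
    Option (PySem.Dict Int Int × Int × List (Int × Int)) → Prop
  | none, none => True
  | some (stk, ps), some (lo, d, ps') =>
      ps' = ps ∧ d = (stk.length : Int) ∧
      (∀ k : Nat, k < stk.length → lo.get? (k : Int) = stk[k]?) ∧
      (∀ x ∈ stk, pvInB n x) ∧ (∀ p ∈ ps, pvInB n p.1 ∧ pvInB n p.2)
  | _, _ => False

theorem pvCollect_sd (n : Int) (l : List (Int × Bool)) :
    ∀ s1 s2, (∀ ip ∈ l, pvInB n ip.1) → pvSD n s1 s2 →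
      pvSD n (l.foldl pvCollect s1) (l.foldl pvCollectB s2) := by
  induction l with
  | nil => intro s1 s2 _ h; exact h
  | cons ip t ih =>
    intro s1 s2 hb h
    rw [List.foldl_cons, List.foldl_cons]
    have hbt : ∀ q ∈ t, pvInB n q.1 := fun q hq => hb q (List.mem_cons_of_mem _ hq)
    have hbi : pvInB n ip.1 := hb ip (List.mem_cons_self)
    match s1, s2, h with
    | none, none, _ =>
      simp only [pvCollect, pvCollectB]
      exact ih none none hbt trivial
    | some (stk, ps), some (lo, d, ps'), h =>
      obtain ⟨hps, hd, hget, hstk, hpairs⟩ := h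
      obtain ⟨i, b⟩ := ip
      cases b with
      | true =>
        apply ih _ _ hbt
        refine ⟨hps, by simp [hd], ?_, ?_, hpairs⟩
        · intro k hk
          simp at hk
          rw [PySem.Dict.get?_insert]
          by_cases hke : k = stk.length
          · subst hke
            simp [hd, PySem.List.pyGet?_natCast]
          · have : ¬((k : Int) = d) := by rw [hd]; omega
            rw [if_neg this, hget k (by omega), List.getElem?_append_left (by omega)]
        · intro x hx
          rcases List.mem_append.mp hx with hx | hx
          · exact hstk x hx
          · simp at hx; subst hx; exact hbi
      | false =>
        simp only [pvCollect, pvCollectB, Bool.false_eq_true, if_false]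
        by_cases hstk0 : stk = []
        · subst hstk0
          have : d - 1 < 0 := by simp at hd; omega
          simp [this, PySem.List.pop?, pvCollect_none, pvCollectB_none]
          all_goals exact trivial
        · obtain ⟨stk0, x, hx⟩ := (List.eq_nil_or_concat stk).resolve_left hstk0
          subst hx
          rw [List.concat_eq_append] at *
          rw [PySem.List.pop?_last]
          have hlen : (stk0 ++ [x]).length = stk0.length + 1 := by simp
          have hdm : ¬(d - 1 < 0) := by rw [hd, hlen]; push_cast; omega
          rw [if_neg hdm]
          have hget0 : lo.get? (d - 1) = some x := by
            have := hget stk0.length (by simp)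
            rw [List.getElem?_append_right (le_refl _)] at this
            simp at this
            rw [hd, hlen]
            push_cast
            simpa using this
          rw [hget0]
          apply ih _ _ hbt
          refine ⟨by rw [hps], by rw [hd, hlen]; push_cast; ring, ?_, ?_, ?_⟩
          · intro k hk
            rw [hget k (by simp; omega), List.getElem?_append_left hk]
          · exact fun y hy => hstk y (List.mem_append_left _ hy)
          · intro p hp
            rcases List.mem_append.mp hp with hp | hp
            · exact hpairs p hp
            · simp at hp; subst hp
              exact ⟨hstk x (by simp), hbi⟩

-- ---- pointwise characterization of the mark fold ----
def pvEdgeHit (n : Int) (t : List (Int × Int)) (j : Int) : Bool :=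
  t.any (fun p => (decide (p.1 = 0) || decide (p.2 = n - 1)) && (decide (j = p.1) || decide (j = p.2)))

def pvZipHit (bs : Int) (z : List ((Int × Int) × (Int × Int))) (j : Int) : Bool :=
  z.any (fun q =>
    (decide (PySem.Int.floordiv q.1.1 bs ≠ PySem.Int.floordiv q.1.2 bs) &&
     (decide (PySem.Int.floordiv q.2.1 bs ≠ PySem.Int.floordiv q.1.1 bs) ||
      decide (PySem.Int.floordiv q.2.2 bs ≠ PySem.Int.floordiv q.1.2 bs))) &&
    (decide (j = q.1.1) || decide (j = q.1.2)))

def pvCtx (pp : Option (Int × Int)) (t : List (Int × Int)) : List ((Int × Int) × (Int × Int)) :=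
  (match pp, t with
   | some p, q :: _ => [(p, q)]
   | _, _ => []) ++ t.zip t.tail

theorem getD_pySetD_true (R : List Bool) (i : Int) (j : Nat) (h0 : 0 ≤ i) (h1 : i < (R.length : Int)) :
    (PySem.List.pySetD R i true).getD j false = (R.getD j false || decide ((j : Int) = i)) := by
  rw [PySem.List.pySetD_of_nonneg R true h0]
  by_cases hj : j < R.length
  · rw [List.getD_eq_getElem _ _ (by simpa using hj), List.getD_eq_getElem _ _ hj,
        List.getElem_set]
    by_cases he : i.toNat = j
    · simp [he, show ((j:Int) = i) by omega]
    · simp [he, show ¬((j:Int) = i) by omega]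
  · rw [List.getD_eq_default _ _ (by simpa using Nat.le_of_not_lt hj),
        List.getD_eq_default _ _ (Nat.le_of_not_lt hj)]
    simp [show ¬((j:Int) = i) by omega]

theorem pvMark_length (bs n : Int) (s : List Bool × Option (Int × Int)) (pr : Int × Int) :
    ((pvMark bs n s pr).1).length = s.1.length := by
  obtain ⟨R, pp⟩ := s
  unfold pvMark
  cases pp <;> dsimp <;> split_ifs <;> simp [PySem.List.length_pySetD]

set_option maxHeartbeats 2000000 in
theorem pvMark_getD (bs n : Int) (t : List (Int × Int)) :
    ∀ (R : List Bool) (pp : Option (Int × Int)) (j : Nat),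
    (∀ p ∈ t, pvInB (R.length : Int) p.1 ∧ pvInB (R.length : Int) p.2) →
    (∀ p, pp = some p → (pvInB (R.length : Int) p.1 ∧ pvInB (R.length : Int) p.2) ∧
        PySem.Int.floordiv p.1 bs ≠ PySem.Int.floordiv p.2 bs) →
    ((t.foldl (pvMark bs n) (R, pp)).1).getD j false =
      (R.getD j false || pvEdgeHit n t (j : Int) || pvZipHit bs (pvCtx pp t) (j : Int)) := by
  induction t with
  | nil =>
    intro R pp j _ _
    cases pp <;> simp [pvEdgeHit, pvZipHit, pvCtx]
  | cons pr t ih =>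
    intro R pp j hbt hbpp
    obtain ⟨o, c⟩ := pr
    have hbo : pvInB (R.length : Int) o ∧ pvInB (R.length : Int) c := by
      simpa using hbt (o, c) List.mem_cons_self
    rw [List.foldl_cons]
    have hmark : pvMark bs n (R, pp) (o, c) =
        ((pvMark bs n (R, pp) (o, c)).1, (pvMark bs n (R, pp) (o, c)).2) := rfl
    rw [hmark]
    have hlen : ((pvMark bs n (R, pp) (o, c)).1).length = R.length := pvMark_length bs n (R, pp) (o, c)
    rw [ih _ _ j (by rw [hlen]; exact fun p hp => hbt p (List.mem_cons_of_mem _ hp)) ?hpp]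
    case hpp =>
      intro p hp
      rw [hlen]
      simp only [pvMark] at hp
      by_cases hsp : PySem.Int.floordiv o bs = PySem.Int.floordiv c bs
      · rw [if_pos hsp] at hp; cases hp
      · rw [if_neg hsp] at hp
        obtain rfl : (o, c) = p := Option.some.inj hp
        exact ⟨hbo, hsp⟩
    -- now compute (pvMark bs n (R, pp) (o, c)).1.getD j false and .2
    have hR2 : ((pvMark bs n (R, pp) (o, c)).1).getD j false =
        (R.getD j false ||
         ((decide (o = 0) || decide (c = n - 1)) && (decide ((j:Int) = o) || decide ((j:Int) = c))) ||
         (match pp with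
          | none => false
          | some p =>
            ((decide (PySem.Int.floordiv o bs ≠ PySem.Int.floordiv p.1 bs) ||
              decide (PySem.Int.floordiv c bs ≠ PySem.Int.floordiv p.2 bs)) &&
             (decide ((j:Int) = p.1) || decide ((j:Int) = p.2))))) := by
      simp only [pvMark]
      cases pp with
      | none =>
        dsimp
        by_cases he : o = 0 ∨ c = n - 1
        · rw [if_pos he,
              getD_pySetD_true _ _ _ hbo.2.1 (by rw [PySem.List.length_pySetD]; exact hbo.2.2),
              getD_pySetD_true _ _ _ hbo.1.1 hbo.1.2]
          rw [Bool.eq_iff_iff]; simp only [Bool.or_eq_true, Bool.and_eq_true, decide_eq_true_eq]; tauto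
        · rw [if_neg he]
          push_neg at he
          rw [Bool.eq_iff_iff]; simp only [Bool.or_eq_true, Bool.and_eq_true, decide_eq_true_eq]; tauto
      | some p =>
        obtain ⟨po, pc⟩ := p
        obtain ⟨⟨hpo, hpc⟩, _⟩ := hbpp (po, pc) rfl
        dsimp
        have hR1len : ∀ (L : List Bool), L.length = R.length →
            (if o = 0 ∨ c = n - 1 then
              PySem.List.pySetD (PySem.List.pySetD L o true) c true else L).length = R.length := by
          intro L hL; split_ifs <;> simp [PySem.List.length_pySetD, hL]
        by_cases hd : PySem.Int.floordiv o bs ≠ PySem.Int.floordiv po bs ∨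
            PySem.Int.floordiv c bs ≠ PySem.Int.floordiv pc bs
        · rw [if_pos hd]
          have hL := hR1len R rfl
          rw [getD_pySetD_true _ _ _ hpc.1 (by rw [PySem.List.length_pySetD, hL]; exact hpc.2),
              getD_pySetD_true _ _ _ hpo.1 (by rw [hL]; exact hpo.2)]
          by_cases he : o = 0 ∨ c = n - 1
          · rw [if_pos he,
                getD_pySetD_true _ _ _ hbo.2.1 (by rw [PySem.List.length_pySetD]; exact hbo.2.2),
                getD_pySetD_true _ _ _ hbo.1.1 hbo.1.2]
            rw [Bool.eq_iff_iff]; simp only [Bool.or_eq_true, Bool.and_eq_true, decide_eq_true_eq]; tauto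
          · rw [if_neg he]
            push_neg at he
            rw [Bool.eq_iff_iff]; simp only [Bool.or_eq_true, Bool.and_eq_true, decide_eq_true_eq]; tauto
        · rw [if_neg hd]
          push_neg at hd
          by_cases he : o = 0 ∨ c = n - 1
          · rw [if_pos he,
                getD_pySetD_true _ _ _ hbo.2.1 (by rw [PySem.List.length_pySetD]; exact hbo.2.2),
                getD_pySetD_true _ _ _ hbo.1.1 hbo.1.2]
            rw [Bool.eq_iff_iff]; simp only [Bool.or_eq_true, Bool.and_eq_true, decide_eq_true_eq]; tauto
          · rw [if_neg he]
            push_neg at he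
            rw [Bool.eq_iff_iff]; simp only [Bool.or_eq_true, Bool.and_eq_true, decide_eq_true_eq]; tauto
    have hpp' : (pvMark bs n (R, pp) (o, c)).2 =
        (if PySem.Int.floordiv o bs = PySem.Int.floordiv c bs then none else some (o, c)) := by
      simp only [pvMark]
    rw [hR2, hpp']
    -- now a boolean identity
    rw [Bool.eq_iff_iff]
    have hedge : pvEdgeHit n ((o, c) :: t) (j:Int) =
        (((decide (o = 0) || decide (c = n - 1)) && (decide ((j:Int) = o) || decide ((j:Int) = c))) ||
          pvEdgeHit n t (j:Int)) := by
      simp [pvEdgeHit, List.any_cons]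
    rw [hedge]
    cases t with
    | nil =>
      cases pp with
      | none =>
        by_cases hs : PySem.Int.floordiv o bs = PySem.Int.floordiv c bs <;>
          simp [hs, pvCtx, pvZipHit] <;> tauto
      | some p =>
        obtain ⟨⟨hpo, hpc⟩, hsp⟩ := hbpp p rfl
        by_cases hs : PySem.Int.floordiv o bs = PySem.Int.floordiv c bs <;>
          simp [hs, pvCtx, pvZipHit, hsp, Bool.or_assoc, Bool.and_assoc] <;> tauto
    | cons r t' =>
      have hz1 : pvCtx pp ((o, c) :: r :: t') =
          (match pp with | some p => [(p, (o, c))] | none => []) ++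
            (((o, c), r) :: pvCtx none (r :: t')) := by
        cases pp <;> simp [pvCtx]
      have hz2 : ∀ pp2, pvCtx pp2 (r :: t') =
          (match pp2 with | some p => [(p, r)] | none => []) ++ pvCtx none (r :: t') := by
        intro pp2; cases pp2 <;> simp [pvCtx]
      cases pp with
      | none =>
        rw [hz1]
        dsimp only
        by_cases hs : PySem.Int.floordiv o bs = PySem.Int.floordiv c bs
        · rw [if_pos hs, hz2 none]
          simp only [List.nil_append, pvZipHit, List.any_cons, List.any_append]
          rw [Bool.eq_iff_iff]; simp only [Bool.or_eq_true, Bool.and_eq_true, decide_eq_true_eq]; tauto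
        · rw [if_neg hs, hz2 (some (o, c))]
          dsimp only
          simp only [List.nil_append, pvZipHit, List.any_cons, List.any_append]
          rw [Bool.eq_iff_iff]; simp only [Bool.or_eq_true, Bool.and_eq_true, decide_eq_true_eq]; tauto
      | some p =>
        obtain ⟨⟨hpo, hpc⟩, hsp⟩ := hbpp p rfl
        rw [hz1]
        dsimp only
        by_cases hs : PySem.Int.floordiv o bs = PySem.Int.floordiv c bs
        · rw [if_pos hs, hz2 none]
          simp only [List.nil_append, List.singleton_append, pvZipHit, List.any_cons, List.any_append]
          rw [Bool.eq_iff_iff]; simp only [Bool.or_eq_true, Bool.and_eq_true, decide_eq_true_eq]; tauto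
        · rw [if_neg hs, hz2 (some (o, c))]
          dsimp only
          simp only [List.nil_append, List.singleton_append, pvZipHit, List.any_cons, List.any_append]
          rw [Bool.eq_iff_iff]; simp only [Bool.or_eq_true, Bool.and_eq_true, decide_eq_true_eq]; tauto

theorem pvMark_fold_length (bs n : Int) (t : List (Int × Int)) :
    ∀ (R : List Bool) (pp : Option (Int × Int)),
    ((t.foldl (pvMark bs n) (R, pp)).1).length = R.length := by
  induction t with
  | nil => intro R pp; rfl
  | cons p t ih =>
    intro R pp
    rw [List.foldl_cons, ih]
    unfold pvMark
    cases pp <;> dsimp <;> split_ifs <;> simp [PySem.List.length_pySetD]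

-- ---- membership of B's marked set ----
theorem mem_edgeMark_fold (n : Int) (t : List (Int × Int)) :
    ∀ (m : PySem.Set Int) (j : Int),
      j ∈ t.foldl (pvEdgeMark n) m ↔ j ∈ m ∨ pvEdgeHit n t j = true := by
  induction t with
  | nil => simp [pvEdgeHit]
  | cons p t ih =>
    intro m j
    rw [List.foldl_cons, ih]
    unfold pvEdgeMark pvEdgeHit
    by_cases h : p.1 = 0 ∨ p.2 = n - 1
    · simp [h, PySem.Set.mem_add]
      aesop
    · simp [h]

theorem mem_zipMark_fold (bs : Int) (z : List ((Int × Int) × (Int × Int))) :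
    ∀ (m : PySem.Set Int) (j : Int),
      j ∈ z.foldl (pvZipMark bs) m ↔ j ∈ m ∨ pvZipHit bs z j = true := by
  induction z with
  | nil => simp [pvZipHit]
  | cons q z ih =>
    intro m j
    rw [List.foldl_cons, ih]
    unfold pvZipMark pvZipHit
    by_cases h : PySem.Int.floordiv q.1.1 bs ≠ PySem.Int.floordiv q.1.2 bs ∧
       (PySem.Int.floordiv q.2.1 bs ≠ PySem.Int.floordiv q.1.1 bs ∨
        PySem.Int.floordiv q.2.2 bs ≠ PySem.Int.floordiv q.1.2 bs)
    · simp [h, PySem.Set.mem_add]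
      aesop
    · simp [h]

-- ---- the two marked-index vectors agree pointwise ----
theorem pvR_eq (P : List Bool) (bs : Int) (pairs : List (Int × Int))
    (hbp : ∀ p ∈ pairs, pvInB (P.length : Int) p.1 ∧ pvInB (P.length : Int) p.2) :
    (pairs.foldl (pvMark bs (P.length : Int)) (P.map (fun _ => false), none)).1 =
      (PySem.List.pyRange 0 (P.length : Int) 1).map
        (fun i => ((pairs.zip pairs.tail).foldl (pvZipMark bs)
            (pairs.foldl (pvEdgeMark (P.length : Int)) PySem.Set.empty)).contains i) := by
  have hlen0 : (P.map (fun _ => false)).length = P.length := by simp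
  have hlenA : ((pairs.foldl (pvMark bs (P.length : Int)) (P.map (fun _ => false), none)).1).length
      = P.length := by rw [pvMark_fold_length, hlen0]
  have hrange := PySem.List.pyRange_zero_natCast P.length
  apply List.ext_getElem
  · rw [hlenA, hrange]; simp
  · intro k hk hk'
    rw [hlenA] at hk
    -- right-hand side element
    have hR : ((PySem.List.pyRange 0 (P.length : Int) 1).map
        (fun i => ((pairs.zip pairs.tail).foldl (pvZipMark bs)
            (pairs.foldl (pvEdgeMark (P.length : Int)) PySem.Set.empty)).contains i))[k]'hk' =
        ((pairs.zip pairs.tail).foldl (pvZipMark bs)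
            (pairs.foldl (pvEdgeMark (P.length : Int)) PySem.Set.empty)).contains (k : Int) := by
      simp [hrange]
    rw [hR]
    -- left-hand side element via the pointwise characterization
    have hgetD := pvMark_getD bs (P.length : Int) pairs (P.map (fun _ => false)) none k
      (by rw [hlen0]; exact hbp) (by intro p hp; cases hp)
    have hkA : k < ((pairs.foldl (pvMark bs (P.length : Int)) (P.map (fun _ => false), none)).1).length := by
      rw [hlenA]; exact hk
    rw [← List.getD_eq_getElem _ false hkA, hgetD]
    have h0 : (P.map (fun _ => false)).getD k false = false := by
      rw [List.getD_eq_getElem _ false (by rw [hlen0]; exact hk)]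
      simp
    have hctx : pvCtx none pairs = pairs.zip pairs.tail := by
      cases pairs <;> simp [pvCtx]
    rw [h0, hctx]
    rw [Bool.eq_iff_iff]
    rw [show (((pairs.zip pairs.tail).foldl (pvZipMark bs)
        (pairs.foldl (pvEdgeMark (P.length : Int)) PySem.Set.empty)).contains (k : Int) = true) ↔
        ((k : Int) ∈ (pairs.zip pairs.tail).foldl (pvZipMark bs)
          (pairs.foldl (pvEdgeMark (P.length : Int)) PySem.Set.empty)) from
      PySem.Set.contains_iff _ _]
    rw [mem_zipMark_fold, mem_edgeMark_fold]
    simp only [Bool.or_eq_true, Bool.false_or]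
    constructor
    · rintro (h | h)
      · exact Or.inl (Or.inr h)
      · exact Or.inr h
    · rintro ((h | h) | h)
      · exact absurd h (by simp [PySem.Set.empty])
      · exact Or.inl h
      · exact Or.inr h

-- ---- the equivalence ----
theorem pv_equal (P : List Bool) (bs : Int) :
    getPioneerFamily P bs = getPioneerFamily_alt P bs := by
  have hsd : pvSD (P.length : Int)
      ((PySem.List.enumerate P).foldl pvCollect (some ([], [])))
      ((PySem.List.enumerate P).foldl pvCollectB (some (PySem.Dict.empty, 0, []))) := by
    apply pvCollect_sd
    · intro ip hip
      obtain ⟨k, hk, rfl⟩ := (PySem.List.mem_enumerate_iff P 0 ip).mp hip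
      exact ⟨by omega, by simpa using hk⟩
    · refine ⟨rfl, by simp, ?_, ?_, ?_⟩
      · intro k hk; simp at hk
      · intro x hx; simp at hx
      · intro p hp; simp at hp
  show (match (PySem.List.enumerate P).foldl (pvStepA bs (P.length : Int))
      (some (P.map (fun _ => false), ([] : List Int), (none : Option (Int × Int)))) with
    | none => (([] : List Bool), ([] : List Bool))
    | some (R, stk, _) => if stk.isEmpty then (R, pvPPrime P R) else ([], [])) = _
  rw [pv_fusion]
  cases hA : (PySem.List.enumerate P).foldl pvCollect (some ([], [])) with
  | none =>
    rw [hA] at hsd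
    cases hB : (PySem.List.enumerate P).foldl pvCollectB (some (PySem.Dict.empty, 0, [])) with
    | none => simp [getPioneerFamily_alt, hB]
    | some r => rw [hB] at hsd; exact absurd hsd (by obtain ⟨a, b, c⟩ := r; simp [pvSD])
  | some r =>
    obtain ⟨stk, pairs⟩ := r
    rw [hA] at hsd
    cases hB : (PySem.List.enumerate P).foldl pvCollectB (some (PySem.Dict.empty, 0, [])) with
    | none => rw [hB] at hsd; exact absurd hsd (by simp [pvSD])
    | some r2 =>
      obtain ⟨lo, d, ps2⟩ := r2
      rw [hB] at hsd
      obtain ⟨hps, hd, -, -, hbp⟩ := hsd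
      subst hps
      show _ = getPioneerFamily_alt P bs
      rw [show getPioneerFamily_alt P bs =
          (match (PySem.List.enumerate P).foldl pvCollectB
              (some (PySem.Dict.empty, (0 : Int), ([] : List (Int × Int)))) with
          | none => (([] : List Bool), ([] : List Bool))
          | some (_, depth, pairs) =>
            if depth = 0 then
              let marked := (pairs.zip pairs.tail).foldl (pvZipMark bs)
                  (pairs.foldl (pvEdgeMark (P.length : Int)) PySem.Set.empty)
              let R := (PySem.List.pyRange 0 (P.length : Int) 1).map (fun i => marked.contains i)
              (R, pvPPrime P R)
            else ([], [])) from rfl, hB]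
      by_cases hstk : stk.isEmpty
      · have hd0 : d = 0 := by rw [hd]; simp [List.isEmpty_iff.mp hstk]
        have hR := pvR_eq P bs ps2 hbp
        simp only [Option.map_some, hstk, if_true, hd0, List.isEmpty_iff.mp hstk]
        simp only [List.isEmpty_nil, if_true]
        rw [hR]
      · have hd0 : ¬(d = 0) := by
          rw [hd]
          have : stk ≠ [] := by simpa [List.isEmpty_iff] using hstk
          have : 0 < stk.length := List.length_pos_of_ne_nil this
          omega
        have hstk' : stk.isEmpty = false := by
          cases h : stk.isEmpty
          · rfl
          · exact absurd h hstk
        simp only [Option.map_some, hstk', Bool.false_eq_true, if_false]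
        rw [if_neg hd0]

-- ===== VERDICT (by name: the statement is the Claim_ definition above) =====
theorem getPioneerFamily_spec : Claim_equal_getPioneerFamily := by
  intro P bs _ _
  unfold Spec_getPioneerFamily
  exact pv_equal P bs
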